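-- pv_equiv track=rewrite | github.com/gmr/pgfmt | src/pgfmt/river.py | _river_line
-- ===== SOURCE A (Python) =====
-- def _river_line(keyword: str, content: str, width: int) -> str:
--     if not content:
--         return f'{keyword:>{width}}'
--     first_prefix = f'{keyword:>{width}} '
--     if '\n' not in content:
--         return f'{first_prefix}{content}'
--     lines = content.split('\n')
--     pad = ' ' * (width + 1)
--     result = [f'{first_prefix}{lines[0]}']
--     for line in lines[1:]:
--         result.append(f'{pad}{line}')
--     return '\n'.join(result)
-- ===== SOURCE B (Python) =====
-- def _river_line(keyword: str, content: str, width: int) -> str: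
--     if not content:
--         return keyword.rjust(width)
--     buf = [keyword.rjust(width), ' ']
--     for ch in content:
--         buf.append(ch)
--         if ch == '\n':
--             buf.append(' ' * (width + 1))
--     return ''.join(buf)
-- ===== Notes on version B (the rewrite author's own statement) =====
-- stated objective: alternative
-- what changed: Replaces A's line-oriented split/slice/loop/join construction by a single character-by-character pass that appends each character to an output buffer and emits the padding right after every newline character; keyword alignment uses str.rjust instead of a format spec.
import Mathlib
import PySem

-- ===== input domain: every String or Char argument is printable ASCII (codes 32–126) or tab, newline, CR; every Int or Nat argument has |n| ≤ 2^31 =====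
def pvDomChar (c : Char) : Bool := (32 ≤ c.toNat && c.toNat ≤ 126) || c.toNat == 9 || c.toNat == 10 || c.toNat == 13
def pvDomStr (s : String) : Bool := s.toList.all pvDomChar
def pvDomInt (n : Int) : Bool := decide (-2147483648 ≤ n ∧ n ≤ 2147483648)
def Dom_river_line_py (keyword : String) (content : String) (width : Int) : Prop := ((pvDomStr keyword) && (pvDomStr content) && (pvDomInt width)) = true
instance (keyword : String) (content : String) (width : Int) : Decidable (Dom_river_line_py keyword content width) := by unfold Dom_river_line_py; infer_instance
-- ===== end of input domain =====

-- B replaces A's line-oriented split/loop/join by a single character pass over content that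
-- appends the padding right after each newline character (alternative decomposition, same result).

-- ===== PORT A =====
-- f'{s:>{w}}' (w ≥ 0, see Pre_) right-justifies s in w spaces: exact as replicate (w - len).toNat.
def river_line_py (keyword : String) (content : String) (width : Int) : String :=
  let rj := List.replicate (width - (keyword.toList.length : Int)).toNat ' ' ++ keyword.toList
  if content.toList.isEmpty then String.ofList rj
  else
    let firstPrefix := rj ++ [' ']
    if PySem.Chars.isIn ['\n'] content.toList = false then String.ofList (firstPrefix ++ content.toList)
    else
      let lines := PySem.Chars.splitOn content.toList ['\n']
      let pad := List.replicate (width + 1).toNat ' '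
      let result := (PySem.List.slice lines (some 1) none).foldl
        (fun r line => r ++ [pad ++ line]) [firstPrefix ++ lines.headD []]
      String.ofList (PySem.Chars.join ['\n'] result)

-- ===== PORT B =====
-- str.rjust is exact as replicate (w - len).toNat (rjust also accepts negative widths).
def river_line_py_alt (keyword : String) (content : String) (width : Int) : String :=
  let rj := List.replicate (width - (keyword.toList.length : Int)).toNat ' ' ++ keyword.toList
  if content.toList.isEmpty then String.ofList rj
  else
    let buf := content.toList.foldl
      (fun b ch => if ch = '\n' then (b ++ [ch]) ++ List.replicate (width + 1).toNat ' ' else b ++ [ch])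
      (rj ++ [' '])
    String.ofList buf

-- ===== PRECONDITION & SPEC =====
-- Python A raises ValueError on a negative width (sign not allowed in a format specifier).
def Pre_river_line_py (keyword : String) (content : String) (width : Int) : Prop := 0 ≤ width
instance (keyword : String) (content : String) (width : Int) : Decidable (Pre_river_line_py keyword content width) := by unfold Pre_river_line_py; infer_instance
def pvWitness_river_line_py : String × String × Int := ("key", "a\nb", 5)

def Spec_river_line_py (keyword : String) (content : String) (width : Int) (out : String) : Prop := out = river_line_py_alt keyword content width
instance (keyword : String) (content : String) (width : Int) (out : String) : Decidable (Spec_river_line_py keyword content width out) := by unfold Spec_river_line_py; infer_instance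

-- ===== CLAIM (what is proved, stated in full; the proofs are below) =====
def Claim_equal_river_line_py : Prop := ∀ (keyword : String) (content : String) (width : Int), Dom_river_line_py keyword content width → Pre_river_line_py keyword content width → Spec_river_line_py keyword content width (river_line_py keyword content width)

-- ===== LEMMAS AND PROOFS =====

-- Effect of B's character loop: each '\n' is followed by the padding.
def padR (nw : List Char) : List Char → List Char
  | [] => []
  | c :: t => if c = '\n' then nw ++ padR nw t else c :: padR nw t

-- Spec of content.split('\n') as a structural recursion.
def splitNL : List Char → List (List Char)
  | [] => [[]]
  | c :: t => if c = '\n' then [] :: splitNL t else (splitNL t).modifyHead (c :: ·)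

lemma foldl_eq_padR (pad : List Char) :
    ∀ (cs init : List Char),
      cs.foldl (fun b ch => if ch = '\n' then (b ++ [ch]) ++ pad else b ++ [ch]) init
        = init ++ padR ('\n' :: pad) cs := by
  intro cs
  induction cs with
  | nil => intro init; simp [padR]
  | cons c t ih =>
    intro init
    by_cases hc : c = '\n'
    · subst hc
      rw [List.foldl_cons, if_pos rfl, ih]
      simp [padR]
    · rw [List.foldl_cons, if_neg hc, ih]
      simp [padR, hc]

lemma splitNL_ne_nil (cs : List Char) : splitNL cs ≠ [] := by
  induction cs with
  | nil => simp [splitNL]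
  | cons c t ih =>
    simp only [splitNL]
    split
    · simp
    · cases h : splitNL t with
      | nil => exact absurd h ih
      | cons x r => simp [List.modifyHead]

lemma splitOn_go_eq :
    ∀ (fuel : Nat) (l cur : List Char) (acc : List (List Char)), l.length ≤ fuel →
      PySem.Chars.splitOn.go ['\n'] fuel l cur acc
        = acc.reverse ++ (splitNL l).modifyHead (cur.reverse ++ ·) := by
  intro fuel
  induction fuel with
  | zero =>
    intro l cur acc h
    have : l = [] := by cases l <;> simp_all
    subst this
    simp [PySem.Chars.splitOn.go, splitNL]
  | succ n ih =>
    intro l cur acc h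
    cases l with
    | nil => simp [PySem.Chars.splitOn.go, splitNL]
    | cons c t =>
      rw [PySem.Chars.splitOn.go]
      by_cases hc : c = '\n'
      · subst hc
        have hp : ['\n'].isPrefixOf ('\n' :: t) = true := by simp [List.isPrefixOf]
        simp only [hp, if_pos]
        simp only [List.length_singleton, List.drop_succ_cons, List.drop_zero]
        rw [ih _ _ _ (by simp at h; omega)]
        simp [splitNL, List.modifyHead]
        cases splitNL t <;> rfl
      · have hp : ['\n'].isPrefixOf (c :: t) = false := by
          simp [List.isPrefixOf]; exact fun h' => (hc h'.symm).elim
        simp only [hp, Bool.false_eq_true, if_neg, not_false_iff]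
        rw [ih _ _ _ (by simp at h; omega)]
        simp only [splitNL, if_neg hc]
        obtain ⟨x, r, hx⟩ : ∃ x r, splitNL t = x :: r := by
          cases hs : splitNL t with
          | nil => exact absurd hs (splitNL_ne_nil t)
          | cons x r => exact ⟨x, r, rfl⟩
        simp [hx, List.modifyHead]

lemma splitOn_eq_splitNL (cs : List Char) :
    PySem.Chars.splitOn cs ['\n'] = splitNL cs := by
  rw [PySem.Chars.splitOn]
  rw [splitOn_go_eq (cs.length + 1) cs [] [] (by omega)]
  cases h : splitNL cs with
  | nil => exact absurd h (splitNL_ne_nil cs)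
  | cons x r => simp [List.modifyHead]

lemma padR_of_not_mem {cs : List Char} (h : '\n' ∉ cs) (nw : List Char) : padR nw cs = cs := by
  induction cs with
  | nil => rfl
  | cons c t ih =>
    simp only [List.mem_cons, not_or] at h
    simp [padR, Ne.symm h.1, ih h.2]

lemma join_splitNL (pad : List Char) :
    ∀ (cs pre : List Char),
      pre ++ padR ('\n' :: pad) cs
        = PySem.Chars.join ['\n']
            ((pre ++ (splitNL cs).headD []) :: ((splitNL cs).drop 1).map (fun l => pad ++ l)) := by
  intro cs
  induction cs with
  | nil => intro pre; simp [splitNL, padR, PySem.Chars.join_singleton]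
  | cons c t ih =>
    intro pre
    by_cases hc : c = '\n'
    · subst hc
      simp only [padR, splitNL, ite_true, List.headD_cons, List.drop_one, List.append_nil]
      obtain ⟨x, r, hx⟩ : ∃ x r, splitNL t = x :: r := by
        cases hs : splitNL t with
        | nil => exact absurd hs (splitNL_ne_nil t)
        | cons x r => exact ⟨x, r, rfl⟩
      rw [hx]
      have := ih pad
      rw [hx] at this
      simp only [List.headD_cons, List.drop_one, List.tail_cons] at this
      rw [List.tail_cons, List.map_cons, PySem.Chars.join_cons_cons, ← this]
      simp
    · simp only [padR, if_neg hc, splitNL]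
      obtain ⟨x, r, hx⟩ : ∃ x r, splitNL t = x :: r := by
        cases hs : splitNL t with
        | nil => exact absurd hs (splitNL_ne_nil t)
        | cons x r => exact ⟨x, r, rfl⟩
      rw [hx]
      simp only [List.modifyHead_cons, List.headD_cons, List.drop_one, List.tail_cons]
      have := ih (pre ++ [c])
      rw [hx] at this
      simp only [List.headD_cons, List.drop_one, List.tail_cons] at this
      rw [List.append_cons pre c (padR ('\n' :: pad) t), List.append_cons pre c x]
      exact this

-- ===== VERDICT (by name: the statement is the Claim_ definition above) =====
theorem river_line_py_spec : Claim_equal_river_line_py := by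
  intro keyword content width _ _
  unfold Spec_river_line_py river_line_py river_line_py_alt
  simp only []
  by_cases he : content.toList.isEmpty
  · simp [he]
  · simp only [he, Bool.false_eq_true, if_neg, not_false_iff]
    rw [foldl_eq_padR]
    by_cases hin : PySem.Chars.isIn ['\n'] content.toList = false
    · simp only [hin, if_pos]
      have hnm : '\n' ∉ content.toList := by
        intro hm
        rw [PySem.Chars.isIn_eq_false_iff] at hin
        obtain ⟨p, q, hpq⟩ := List.append_of_mem hm
        exact hin ⟨p, q, by rw [hpq]; simp⟩
      rw [padR_of_not_mem hnm]
    · simp only [hin, if_neg, Bool.not_eq_false]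
      rw [PySem.List.slice_from _ (by norm_num), PySem.List.foldl_append_singleton_eq_map]
      rw [splitOn_eq_splitNL]
      have := join_splitNL (List.replicate (width + 1).toNat ' ') content.toList
        (List.replicate (width - (keyword.toList.length : Int)).toNat ' ' ++ keyword.toList ++ [' '])
      simp only [Int.toNat_one] at *
      rw [List.singleton_append, ← this]
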